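-- pv_equiv track=rewrite | github.com/ImSakunthala/leetcode | Easy/String/strong_password_checker_II.py | check_character_repetition
-- ===== SOURCE A (Python) =====
-- def check_character_repetition(password: str, max_occurrence=2) -> bool:
--     prev_character = ''
--     current_occurrence = 0
--
--     for char in password:
--         if char == prev_character:
--             current_occurrence += 1
--         else:
--             prev_character = char
--             current_occurrence = 1
--
--         if current_occurrence != max_occurrence:
--             continue
--         else:
--             return False
--     return True
-- ===== SOURCE B (Python) =====
-- def check_character_repetition(password: str, max_occurrence=2) -> bool:
--     # Decompose the password into maximal runs of equal characters,
--     # then the password is fine iff every run is shorter than max_occurrence.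
--     runs = []
--     for ch in password:
--         if runs and ch == runs[-1][0]:
--             runs[-1][1] += 1
--         else:
--             runs.append([ch, 1])
--     return all(n < max_occurrence for _, n in runs)
-- ===== Notes on version B (the rewrite author's own statement) =====
-- stated objective: idiomatic
-- what changed: Replaces the flat pass with a running (prev, counter) state and early return by a two-phase decomposition: first build the list of maximal runs of equal characters, then return True iff every run length is below max_occurrence.
-- intended difference: For non-positive max_occurrence and a nonempty password, A returns True (its counter, always >= 1, can never equal a non-positive target), while B returns False because every run already has length >= max_occurrence; B's value is the intended one, since a repetition limit of zero (or less) is violated by any character at all. — e.g. on check_character_repetition("aa", 0): A returns true, B returns false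
import Mathlib
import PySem

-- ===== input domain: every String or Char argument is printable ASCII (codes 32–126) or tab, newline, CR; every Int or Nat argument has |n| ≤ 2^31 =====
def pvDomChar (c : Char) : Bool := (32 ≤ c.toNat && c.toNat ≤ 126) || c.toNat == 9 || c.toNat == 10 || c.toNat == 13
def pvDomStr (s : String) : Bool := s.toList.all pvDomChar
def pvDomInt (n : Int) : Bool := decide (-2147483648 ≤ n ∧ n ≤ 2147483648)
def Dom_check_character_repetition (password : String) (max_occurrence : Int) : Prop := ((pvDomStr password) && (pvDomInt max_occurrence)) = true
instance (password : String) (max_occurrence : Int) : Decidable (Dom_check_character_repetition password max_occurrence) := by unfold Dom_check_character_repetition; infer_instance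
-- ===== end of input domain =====

-- B builds the list of maximal runs of equal characters first and then tests every run
-- length, instead of A's one flat pass with a (prev, counter) state and early return
-- (idiomatic decomposition); on non-positive max_occurrence with a nonempty password
-- B returns False where A returns True (stated as the intended difference D_ below).

-- ===== PORT A =====
-- the for-loop: state is (prev_character : Option Char — none models the initial '', current_occurrence)
def pvLoopA (m : Int) : List Char → Option Char → Int → Bool
  | [], _, _ => true
  | c :: cs, prev, occ =>
    let st := if some c = prev then (prev, occ + 1) else (some c, (1 : Int))
    if st.2 ≠ m then pvLoopA m cs st.1 st.2 else false

def check_character_repetition (password : String) (max_occurrence : Int) : Bool :=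
  pvLoopA max_occurrence password.toList none 0

-- ===== PORT B =====
-- Source B's run-building loop: runs is a list of (char, count); `runs[-1][1] += 1`
-- becomes replacing the last pair, `runs.append([ch, 1])` appending a fresh pair.
def pvBuildRuns : List (Char × Int) → List Char → List (Char × Int)
  | runs, [] => runs
  | runs, c :: cs =>
    match runs.getLast? with
    | some (d, n) =>
      if c = d then pvBuildRuns (runs.dropLast ++ [(d, n + 1)]) cs
      else pvBuildRuns (runs ++ [(c, 1)]) cs
    | none => pvBuildRuns [(c, 1)] cs

def check_character_repetition_alt (password : String) (max_occurrence : Int) : Bool :=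
  (pvBuildRuns [] password.toList).all (fun p => decide (p.2 < max_occurrence))

-- ===== PRECONDITION & SPEC =====
-- For non-positive max_occurrence and a nonempty password, A returns True (its counter,
-- always ≥ 1, can never equal a non-positive target), while B returns False because every
-- run already has length ≥ max_occurrence; B's value is the intended one, since a
-- repetition limit of zero (or less) is violated by any character at all.
def D_check_character_repetition (password : String) (max_occurrence : Int) : Prop :=
  max_occurrence ≤ 0 ∧ password ≠ ""
instance (password : String) (max_occurrence : Int) : Decidable (D_check_character_repetition password max_occurrence) := by unfold D_check_character_repetition; infer_instance

def Spec_check_character_repetition (password : String) (max_occurrence : Int) (out : Bool) : Prop := ¬ D_check_character_repetition password max_occurrence → out = check_character_repetition_alt password max_occurrence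
instance (password : String) (max_occurrence : Int) (out : Bool) : Decidable (Spec_check_character_repetition password max_occurrence out) := by unfold Spec_check_character_repetition; infer_instance

def pvDiffWitness_check_character_repetition : String × Int := ("aa", 0)
def pvDiffWitnessOut_check_character_repetition : Bool × Bool := (true, false)

-- ===== CLAIM (what is proved, stated in full; the proofs are below) =====
def Claim_unchanged_check_character_repetition : Prop := ∀ (password : String) (max_occurrence : Int), Dom_check_character_repetition password max_occurrence → Spec_check_character_repetition password max_occurrence (check_character_repetition password max_occurrence)
def Claim_changed_check_character_repetition : Prop := Dom_check_character_repetition (pvDiffWitness_check_character_repetition.1) (pvDiffWitness_check_character_repetition.2) ∧ D_check_character_repetition (pvDiffWitness_check_character_repetition.1) (pvDiffWitness_check_character_repetition.2) ∧ check_character_repetition (pvDiffWitness_check_character_repetition.1) (pvDiffWitness_check_character_repetition.2) = pvDiffWitnessOut_check_character_repetition.1 ∧ check_character_repetition_alt (pvDiffWitness_check_character_repetition.1) (pvDiffWitness_check_character_repetition.2) = pvDiffWitnessOut_check_character_repetition.2 ∧ pvDiffWitnessOut_check_character_repetition.1 ≠ pvDiffWitnessOut_check_character_repetition.2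
def Claim_exact_check_character_repetition : Prop := ∀ (password : String) (max_occurrence : Int), Dom_check_character_repetition password max_occurrence → D_check_character_repetition password max_occurrence → check_character_repetition password max_occurrence ≠ check_character_repetition_alt password max_occurrence

-- ===== LEMMAS AND PROOFS =====

-- Reference run decomposition: (head char, length) of each maximal run.
def pvRuns : List Char → List (Char × Int)
  | [] => []
  | c :: cs =>
    (c, ((1 + (cs.takeWhile (· == c)).length : Nat) : Int)) :: pvRuns (cs.dropWhile (· == c))
  termination_by l => l.length
  decreasing_by
    simp only [List.length_cons]
    exact Nat.lt_succ_of_le (List.length_dropWhile_le _ _)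

-- B's left-to-right builder equals the reference decomposition (generalized over the
-- accumulator: the last open run absorbs exactly the leading equal characters).
theorem pvBuildRuns_last (l : List Char) : ∀ (rs : List (Char × Int)) (d : Char) (n : Int),
    pvBuildRuns (rs ++ [(d, n)]) l =
      rs ++ [(d, n + ((l.takeWhile (· == d)).length : Int))] ++ pvRuns (l.dropWhile (· == d)) := by
  induction hn : l.length using Nat.strong_induction_on generalizing l with
  | _ k ih =>
  intro rs d n
  cases l with
  | nil => simp [pvBuildRuns, pvRuns]
  | cons c cs =>
    have hlast : (rs ++ [(d, n)]).getLast? = some (d, n) := by simp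
    have hdrop : (rs ++ [(d, n)]).dropLast = rs := by simp
    by_cases hc : c = d
    · subst hc
      have h1 : pvBuildRuns (rs ++ [(c, n)]) (c :: cs) = pvBuildRuns (rs ++ [(c, n + 1)]) cs := by
        simp only [pvBuildRuns, hlast, hdrop]
        simp
      rw [h1, ih cs.length (by subst hn; simp) cs rfl rs c (n + 1)]
      have htw : ((c :: cs).takeWhile (· == c)) = c :: cs.takeWhile (· == c) := by simp
      have hdw : ((c :: cs).dropWhile (· == c)) = cs.dropWhile (· == c) := by simp
      rw [htw, hdw]
      have : n + 1 + ((cs.takeWhile (· == c)).length : Int)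
          = n + (((c :: cs.takeWhile (· == c)).length : Nat) : Int) := by
        simp only [List.length_cons]
        push_cast
        ring
      rw [this]
    · have hbeq : (c == d) = false := by simp [hc]
      have h1 : pvBuildRuns (rs ++ [(d, n)]) (c :: cs)
          = pvBuildRuns ((rs ++ [(d, n)]) ++ [(c, 1)]) cs := by
        simp only [pvBuildRuns, hlast]
        simp [hc]
      rw [h1, ih cs.length (by subst hn; simp) cs rfl (rs ++ [(d, n)]) c 1]
      have htw : ((c :: cs).takeWhile (· == d)) = [] := by simp [hbeq]
      have hdw : ((c :: cs).dropWhile (· == d)) = c :: cs := by simp [hbeq]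
      rw [htw, hdw, pvRuns]
      push_cast
      simp

theorem pvBuildRuns_eq (l : List Char) : pvBuildRuns [] l = pvRuns l := by
  cases l with
  | nil => rw [pvRuns]; rfl
  | cons c cs =>
    have h1 : pvBuildRuns ([] : List (Char × Int)) (c :: cs) = pvBuildRuns [(c, 1)] cs := by
      simp only [pvBuildRuns, List.getLast?_nil]
    have h2 := pvBuildRuns_last cs [] c 1
    simp only [List.nil_append] at h2
    rw [h1, h2, pvRuns]
    push_cast
    simp

-- Every run length is at least 1.
theorem pvRuns_pos (l : List Char) : ∀ p ∈ pvRuns l, 1 ≤ p.2 := by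
  induction hn : l.length using Nat.strong_induction_on generalizing l with
  | _ k ih =>
  cases l with
  | nil => simp [pvRuns]
  | cons c cs =>
    intro p hp
    rw [pvRuns] at hp
    rcases List.mem_cons.mp hp with h | h
    · subst h; push_cast; omega
    · exact ih (cs.dropWhile (· == c)).length
        (by subst hn; simpa using Nat.lt_succ_of_le (List.length_dropWhile_le _ _))
        _ rfl p h

-- A inside a run of c: the counter climbs from occ; it hits m on this run iff
-- occ + 1 ≤ m ≤ occ + run-prefix length, else the loop resumes past the run.
theorem pvLoopA_inrun (m : Int) (cs : List Char) (c : Char) (occ : Int) :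
    pvLoopA m cs (some c) occ =
      if occ + 1 ≤ m ∧ m ≤ occ + ((cs.takeWhile (· == c)).length : Int) then false
      else pvLoopA m (cs.dropWhile (· == c)) (some c) (occ + ((cs.takeWhile (· == c)).length : Int)) := by
  induction cs generalizing occ with
  | nil =>
    simp only [List.takeWhile_nil, List.dropWhile_nil, List.length_nil, Nat.cast_zero, add_zero]
    rw [if_neg (by omega)]
  | cons d cs ih =>
    by_cases hd : d = c
    · subst hd
      have htw : (d :: cs).takeWhile (· == d) = d :: cs.takeWhile (· == d) := by simp
      have hdw : (d :: cs).dropWhile (· == d) = cs.dropWhile (· == d) := by simp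
      rw [htw, hdw]
      have hlen : ((d :: cs.takeWhile (· == d)).length : Int)
          = ((cs.takeWhile (· == d)).length : Int) + 1 := by simp
      rw [hlen]
      have hL : pvLoopA m (d :: cs) (some d) occ
          = if occ + 1 ≠ m then pvLoopA m cs (some d) (occ + 1) else false := by
        simp [pvLoopA]
      rw [hL]
      by_cases hm : occ + 1 = m
      · rw [if_neg (not_not_intro hm), if_pos (by constructor <;> omega)]
      · rw [if_pos hm, ih (occ + 1)]
        by_cases hc : occ + 1 + 1 ≤ m ∧ m ≤ occ + 1 + ((cs.takeWhile (· == d)).length : Int)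
        · rw [if_pos hc, if_pos (by obtain ⟨h1, h2⟩ := hc; constructor <;> omega)]
        · rw [if_neg hc, if_neg (by
            rintro ⟨h1, h2⟩
            exact hc ⟨by omega, by omega⟩)]
          have : occ + 1 + ((cs.takeWhile (· == d)).length : Int)
              = occ + (((cs.takeWhile (· == d)).length : Int) + 1) := by ring
          rw [this]
    · have hbeq : (d == c) = false := by simp [hd]
      have htw : (d :: cs).takeWhile (· == c) = [] := by simp [hbeq]
      have hdw : (d :: cs).dropWhile (· == c) = d :: cs := by simp [hbeq]
      rw [htw, hdw]
      simp only [List.length_nil, Nat.cast_zero, add_zero]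
      rw [if_neg (by omega)]

-- A at the start of a fresh run computes the run-length test over pvRuns.
theorem pvLoopA_fresh (m : Int) (l : List Char) (prev : Option Char) (occ : Int)
    (h : ∀ c cs, l = c :: cs → prev ≠ some c) :
    pvLoopA m l prev occ =
      !((pvRuns l).any (fun p => decide (1 ≤ m ∧ m ≤ p.2))) := by
  induction hn : l.length using Nat.strong_induction_on generalizing l prev occ with
  | _ n ih =>
  cases l with
  | nil => simp [pvLoopA, pvRuns]
  | cons c cs =>
    have hne : some c ≠ prev := fun h' => h c cs rfl h'.symm
    rw [pvRuns]
    have hL : pvLoopA m (c :: cs) prev occ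
        = if (1 : Int) ≠ m then pvLoopA m cs (some c) 1 else false := by
      simp [pvLoopA, hne]
    rw [hL]
    by_cases hm1 : (1 : Int) = m
    · have hf : decide (1 ≤ m ∧ m ≤ ((1 + (cs.takeWhile (· == c)).length : Nat) : Int)) = true := by
        rw [decide_eq_true_iff]
        constructor
        · omega
        · push_cast; omega
      rw [if_neg (not_not_intro hm1)]
      simp only [List.any_cons, hf, Bool.true_or, Bool.not_true]
    · rw [if_pos hm1, pvLoopA_inrun]
      by_cases hc : (1 : Int) + 1 ≤ m ∧ m ≤ 1 + ((cs.takeWhile (· == c)).length : Int)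
      · rw [if_pos hc]
        have hf : decide (1 ≤ m ∧ m ≤ ((1 + (cs.takeWhile (· == c)).length : Nat) : Int)) = true := by
          rw [decide_eq_true_iff]
          obtain ⟨h1, h2⟩ := hc
          constructor
          · omega
          · push_cast; omega
        simp only [List.any_cons, hf, Bool.true_or, Bool.not_true]
      · rw [if_neg hc]
        have hf : decide (1 ≤ m ∧ m ≤ ((1 + (cs.takeWhile (· == c)).length : Nat) : Int)) = false := by
          rw [decide_eq_false_iff_not]
          rintro ⟨h1, h2⟩
          push_cast at h2
          exact hc ⟨by omega, by omega⟩
        have hlen : (cs.dropWhile (· == c)).length < n := by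
          subst hn
          exact Nat.lt_succ_of_le (List.length_dropWhile_le _ _)
        rw [ih _ hlen _ (some c) _ ?_ rfl]
        · simp only [List.any_cons, hf, Bool.false_or]
        · intro d ds hds hd
          have hnot := List.head?_dropWhile_not (· == c) cs
          rw [hds] at hnot
          simp only [List.head?_cons] at hnot
          injection hd with hd'
          subst hd'
          simp at hnot

-- Bridge: for a positive target, "no run ever reaches m" is "every run is shorter than m".
theorem pvAnyAll (m : Int) (hm : 1 ≤ m) (rs : List (Char × Int)) (hpos : ∀ p ∈ rs, 1 ≤ p.2) :
    (!(rs.any (fun p => decide (1 ≤ m ∧ m ≤ p.2)))) = rs.all (fun p => decide (p.2 < m)) := by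
  induction rs with
  | nil => simp
  | cons q qs ih =>
    have hq := hpos q (List.mem_cons_self ..)
    have hrest : ∀ p ∈ qs, 1 ≤ p.2 := fun p hp => hpos p (List.mem_cons_of_mem _ hp)
    simp only [List.any_cons, List.all_cons, Bool.not_or, ih hrest]
    congr 1
    simp only [← decide_not, decide_eq_decide]
    omega

-- ===== VERDICT (by name: the statement is the Claim_ definition above) =====
theorem check_character_repetition_spec : Claim_unchanged_check_character_repetition := by
  intro password m _ hD
  unfold check_character_repetition check_character_repetition_alt
  rw [pvBuildRuns_eq, pvLoopA_fresh m password.toList none 0 (by intro _ _ _ h; cases h)]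
  by_cases hm : m ≤ 0
  · have hemp : password = "" := by
      by_contra hne
      exact hD ⟨hm, hne⟩
    subst hemp
    rw [show ("" : String).toList = [] from rfl, pvRuns]
    rfl
  · exact pvAnyAll m (by omega) _ (pvRuns_pos password.toList)

theorem check_character_repetition_changed : Claim_changed_check_character_repetition := by
  unfold Claim_changed_check_character_repetition; decide

theorem check_character_repetition_tight : Claim_exact_check_character_repetition := by
  intro password m _ hD
  obtain ⟨hm, hne⟩ := hD
  obtain ⟨c, cs, hl⟩ : ∃ c cs, password.toList = c :: cs := by
    cases hcl : password.toList with
    | nil => exact absurd (String.toList_eq_nil_iff.mp hcl) hne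
    | cons c cs => exact ⟨c, cs, rfl⟩
  unfold check_character_repetition check_character_repetition_alt
  rw [pvBuildRuns_eq, pvLoopA_fresh m password.toList none 0 (by intro _ _ _ h; cases h), hl]
  have hany : ((pvRuns (c :: cs)).any fun p => decide (1 ≤ m ∧ m ≤ p.2)) = false := by
    rw [List.any_eq_false]
    intro p _
    simp only [decide_eq_true_iff, not_and]
    intro h1
    omega
  have hall : ((pvRuns (c :: cs)).all fun p => decide (p.2 < m)) = false := by
    rw [List.all_eq_false]
    refine ⟨(c, ((1 + (cs.takeWhile (· == c)).length : Nat) : Int)), ?_, ?_⟩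
    · rw [pvRuns]; exact List.mem_cons_self ..
    · simp only [decide_eq_true_iff, not_lt]
      push_cast
      omega
  rw [hany, hall]
  decide
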